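-- pv_equiv track=rewrite | github.com/gardenlinux/glvd-data-ingestion | unreleased-patch-versions.py | get_next_unreleased_versions
-- ===== SOURCE A (Python) =====
-- def get_next_unreleased_versions(version_string: str) -> str:
--     """ Get one long string with many Garden Linux Versions included
--         find the next minor version for each major version.
--
--     >>> get_next_unreleased_versions("1592.4")
--     '1592.5'
--     >>> get_next_unreleased_versions("1877.10.0")
--     '1877.11.0'
--     >>> get_next_unreleased_versions("2345.0")
--     '2345.1.0'
--     >>> get_next_unreleased_versions("1877.10 1592.4 2345.1")
--     '1592.5 1877.11.0 2345.2.0'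
--
--     """
--     versions = version_string.split()
--     major_versions = {}
--
--     for version in versions:
--         version_split = list(map(int, version.split('.')))
--         major = version_split[0]
--         minor = version_split[1]
--
--         if major not in major_versions:
--             major_versions[major] = minor
--         else:
--             major_versions[major] = max(major_versions[major], minor)
--
--
--     next_versions = []
--     for major, minor in sorted(major_versions.items()):
--          next_version = f"{major}.{minor + 1}"
--          if major >= 1877:
--              next_version += ".0"
--          next_versions.append(next_version)
--
--
--     return ' '.join(next_versions)
-- ===== SOURCE B (Python) =====
-- def get_next_unreleased_versions(version_string: str) -> str:
--     pairs = []
--     for token in version_string.split():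
--         nums = [int(part) for part in token.split('.')]
--         pairs.append((nums[0], nums[1]))
--     results = []
--     for major in sorted({m for m, _ in pairs}):
--         top = max(minor for m, minor in pairs if m == major)
--         suffix = ".0" if major >= 1877 else ""
--         results.append(f"{major}.{top + 1}{suffix}")
--     return ' '.join(results)
-- ===== Notes on version B (the rewrite author's own statement) =====
-- stated objective: alternative
-- what changed: Replaces A's dict that accumulates a running max per major (then sorts the items) with a flat list of (major, minor) pairs: B sorts the distinct majors and computes each major's maximum minor by a direct scan of the pair list.
import Mathlib
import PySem

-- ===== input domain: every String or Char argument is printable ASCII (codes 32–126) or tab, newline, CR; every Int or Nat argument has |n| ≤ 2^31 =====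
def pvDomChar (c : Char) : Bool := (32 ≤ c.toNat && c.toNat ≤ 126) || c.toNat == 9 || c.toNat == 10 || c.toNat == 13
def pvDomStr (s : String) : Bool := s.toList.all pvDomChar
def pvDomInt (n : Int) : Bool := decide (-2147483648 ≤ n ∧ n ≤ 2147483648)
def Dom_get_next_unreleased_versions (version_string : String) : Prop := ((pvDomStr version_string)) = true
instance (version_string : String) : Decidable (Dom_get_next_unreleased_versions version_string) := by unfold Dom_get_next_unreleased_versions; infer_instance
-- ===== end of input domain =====

-- B replaces A's dict-of-running-maxima with a flat pair list: sorted distinct majors, then a per-major max scan (objective: alternative).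


-- ===== PORT A =====
-- `list(map(int, version.split('.')))`; none exactly where Python's int() raises ValueError
def pvNumsA (t : String) : Option (List Int) :=
  ((PySem.Str.split? t ".").getD []).mapM PySem.Int.ofStr?

-- `version_split[0]`, `version_split[1]`; none where Python raises (ValueError or IndexError)
def pvMajMinA (t : String) : Option (Int × Int) :=
  match pvNumsA t with
  | none => none
  | some ns =>
    match PySem.List.pyGet? ns 0, PySem.List.pyGet? ns 1 with
    | some a, some b => some (a, b)
    | _, _ => none

def get_next_unreleased_versions (version_string : String) : String :=
  let versions := PySem.Str.split₀ version_string
  let major_versions := versions.foldl (fun d v =>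
    match pvMajMinA v with
    | none => d  -- unreachable under Pre_: Python raises here
    | some (major, minor) =>
      if d.contains major = false then d.insert major minor
      else d.insert major (max (d.getD major 0) minor)) PySem.Dict.empty
  let next_versions := (PySem.List.sorted2 major_versions.items Prod.fst Prod.snd).foldl
    (fun acc p =>
      let next_version := PySem.Int.toStr p.1 ++ "." ++ PySem.Int.toStr (p.2 + 1)
      let next_version := if p.1 ≥ 1877 then next_version ++ ".0" else next_version
      acc ++ [next_version]) []
  PySem.Str.join " " next_versions

-- ===== PORT B =====
-- `[int(part) for part in token.split('.')]` then `(nums[0], nums[1])`; the (0, 0) default is unreachable under Pre_ (Python raises there)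
def pvPairB (t : String) : Int × Int :=
  match (((PySem.Str.split? t ".").getD []).mapM PySem.Int.ofStr? : Option (List Int)) with
  | some ns => ((PySem.List.pyGet? ns 0).getD 0, (PySem.List.pyGet? ns 1).getD 0)
  | none => (0, 0)

def get_next_unreleased_versions_alt (version_string : String) : String :=
  let pairs := (PySem.Str.split₀ version_string).map pvPairB
  let results := (PySem.List.sorted (PySem.Set.ofList (pairs.map Prod.fst)) (fun x => x)).map
    (fun major =>
      let top := (PySem.List.max? ((pairs.filter (fun p => p.1 == major)).map Prod.snd) (fun x => x)).getD 0
      let suffix := if major ≥ 1877 then ".0" else ""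
      PySem.Int.toStr major ++ "." ++ PySem.Int.toStr (top + 1) ++ suffix)
  PySem.Str.join " " results

-- ===== PRECONDITION & SPEC =====
-- Pre_ excludes exactly the inputs where A raises (and B raises identically): some whitespace token whose
-- dot-separated parts do not all parse as int() (ValueError) or that has fewer than two parts (IndexError).
def Pre_get_next_unreleased_versions (version_string : String) : Prop :=
  ((PySem.Str.split₀ version_string).all (fun t =>
    match (((PySem.Str.split? t ".").getD []).mapM PySem.Int.ofStr? : Option (List Int)) with
    | some ns => decide (2 ≤ ns.length)
    | none => false)) = true
instance (version_string : String) : Decidable (Pre_get_next_unreleased_versions version_string) := by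
  unfold Pre_get_next_unreleased_versions; infer_instance

def pvWitness_get_next_unreleased_versions : String := "1877.10 1592.4 2345.1"

def Spec_get_next_unreleased_versions (version_string : String) (out : String) : Prop := out = get_next_unreleased_versions_alt version_string
instance (version_string : String) (out : String) : Decidable (Spec_get_next_unreleased_versions version_string out) := by unfold Spec_get_next_unreleased_versions; infer_instance

-- ===== CLAIM (what is proved, stated in full; the proofs are below) =====
def Claim_equal_get_next_unreleased_versions : Prop := ∀ (version_string : String), Dom_get_next_unreleased_versions version_string → Pre_get_next_unreleased_versions version_string → Spec_get_next_unreleased_versions version_string (get_next_unreleased_versions version_string)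

-- ===== LEMMAS AND PROOFS =====

-- the max-accumulating value of an optional running maximum, as A's dict loop maintains it
def pvMax0 (o : Option Int) (ms : List Int) : Option Int :=
  ms.foldl (fun o x => some (match o with | none => x | some y => max y x)) o

-- A's dict-update step, written as a single insert
def pvStep (d : PySem.Dict Int Int) (p : Int × Int) : PySem.Dict Int Int :=
  d.insert p.1 (if d.contains p.1 = false then p.2 else max (d.getD p.1 0) p.2)

lemma pvMax0_some (a : Int) (ms : List Int) : pvMax0 (some a) ms = some (ms.foldl max a) := by
  induction ms generalizing a with
  | nil => rfl
  | cons x t ih => simp [pvMax0, List.foldl_cons] at *; exact ih (max a x)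

lemma pvStep_get? (d : PySem.Dict Int Int) (p : Int × Int) (m : Int) :
    (pvStep d p).get? m = if m = p.1 then some (match d.get? p.1 with | none => p.2 | some y => max y p.2) else d.get? m := by
  rw [pvStep, PySem.Dict.get?_insert]
  rcases h : d.get? p.1 with _ | y <;>
    simp [PySem.Dict.contains_eq_isSome_get?, h, PySem.Dict.getD, Option.getD]

lemma pvFold_get? (L : List (Int × Int)) (d : PySem.Dict Int Int) (m : Int) :
    (L.foldl pvStep d).get? m = pvMax0 (d.get? m) ((L.filter (fun p => p.1 == m)).map Prod.snd) := by
  induction L generalizing d with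
  | nil => rfl
  | cons p t ih =>
    rw [List.foldl_cons, ih]
    by_cases h : p.1 = m
    · subst h
      rw [pvStep_get?]
      simp [pvMax0]
    · rw [pvStep_get?]
      simp [h, Ne.symm h]

-- sorting with a secondary key coincides with sorting by the first key alone when the comparison never reaches the tie-breaker
lemma pvInsertBy_congr {α : Type} (b1 b2 : α → α → Bool) (x : α) (acc : List α)
    (h : ∀ c ∈ acc, b1 x c = b2 x c) :
    PySem.List.insertBy b1 x acc = PySem.List.insertBy b2 x acc := by
  induction acc with
  | nil => rfl
  | cons y t ih =>
    rw [PySem.List.insertBy, PySem.List.insertBy]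
    rw [h y (by simp)]
    by_cases hb : b2 x y = true
    · simp [hb]
    · simp [hb]
      exact ih (fun c hc => h c (by simp [hc]))

lemma pvFoldl_insertBy_congr {α : Type} (b1 b2 : α → α → Bool) :
    ∀ (xs acc : List α), (∀ a ∈ xs, ∀ c, (c ∈ acc ∨ c ∈ xs) → b1 a c = b2 a c) →
    xs.foldl (fun acc x => PySem.List.insertBy b1 x acc) acc =
      xs.foldl (fun acc x => PySem.List.insertBy b2 x acc) acc := by
  intro xs
  induction xs with
  | nil => intro acc _; rfl
  | cons x t ih =>
    intro acc h
    rw [List.foldl_cons, List.foldl_cons]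
    have hx : PySem.List.insertBy b1 x acc = PySem.List.insertBy b2 x acc :=
      pvInsertBy_congr b1 b2 x acc (fun c hc => h x (by simp) c (Or.inl hc))
    rw [hx]
    apply ih
    intro a ha c hc
    apply h a (by simp [ha])
    rcases hc with hc | hc
    · rw [PySem.List.insertBy_mem_iff] at hc
      rcases hc with hc | hc
      · subst hc; exact Or.inr (by simp)
      · exact Or.inl hc
    · exact Or.inr (by simp [hc])

lemma pvSorted2_eq (xs ys : List (Int × Int)) (hperm : ys.Perm xs)
    (hpw : ys.Pairwise (fun a b => a.1 < b.1)) :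
    PySem.List.sorted2 xs Prod.fst Prod.snd = ys := by
  have hinj : ∀ a ∈ xs, ∀ b ∈ xs, a.1 = b.1 → a = b := by
    have hnd : (ys.map Prod.fst).Nodup := by
      rw [List.nodup_iff_pairwise_ne]
      exact (List.pairwise_map.mpr hpw).imp (fun h => ne_of_lt h)
    intro a ha b hb hab
    have ha' : a ∈ ys := hperm.mem_iff.mpr ha
    have hb' : b ∈ ys := hperm.mem_iff.mpr hb
    exact List.inj_on_of_nodup_map hnd ha' hb' hab
  have hbefore : ∀ a ∈ xs, ∀ c, c ∈ ([] : List (Int × Int)) ∨ c ∈ xs →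
      (fun a b => decide (a.1 < b.1) || (!decide (b.1 < a.1) && decide (a.2 < b.2))) a c
        = (fun a b => decide (a.1 < b.1)) a c := by
    intro a ha c hc
    rcases hc with hc | hc
    · simp at hc
    · by_cases h1 : a.1 < c.1
      · simp [h1]
      · by_cases h2 : c.1 < a.1
        · simp [h1, h2]
        · have : a.1 = c.1 := le_antisymm (not_lt.mp h2) (not_lt.mp h1)
          have : a = c := hinj a ha c hc this
          subst this
          simp
  have h2 : PySem.List.sorted2 xs Prod.fst Prod.snd =
      PySem.List.sorted xs Prod.fst := by
    rw [PySem.List.sorted_eq_foldl_insertBy]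
    show xs.foldl (fun acc x => PySem.List.insertBy _ x acc) [] = _
    exact pvFoldl_insertBy_congr _ _ xs [] hbefore
  rw [h2]
  exact PySem.List.sorted_eq_of_perm_of_pairwise_lt xs ys Prod.fst hperm hpw

lemma pvTokOk_majmin (t : String)
    (h : (match (((PySem.Str.split? t ".").getD []).mapM PySem.Int.ofStr? : Option (List Int)) with
          | some ns => decide (2 ≤ ns.length)
          | none => false) = true) :
    pvMajMinA t = some (pvPairB t) := by
  rcases hns : (((PySem.Str.split? t ".").getD []).mapM PySem.Int.ofStr? : Option (List Int)) with _ | ns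
  · rw [hns] at h; simp at h
  · rw [hns] at h
    simp only [decide_eq_true_eq] at h
    have h0 := PySem.List.pyGet?_ofNat ns 0 (by omega)
    have h1 := PySem.List.pyGet?_ofNat ns 1 (by omega)
    unfold pvMajMinA pvNumsA pvPairB
    rw [hns]
    norm_num at h0 h1
    simp [h0, h1]

lemma pvFoldA (toks : List String)
    (h : ∀ t ∈ toks, pvMajMinA t = some (pvPairB t)) (e : PySem.Dict Int Int) :
    toks.foldl (fun d v =>
      match pvMajMinA v with
      | none => d
      | some (major, minor) =>
        if d.contains major = false then d.insert major minor
        else d.insert major (max (d.getD major 0) minor)) e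
    = (toks.map pvPairB).foldl pvStep e := by
  induction toks generalizing e with
  | nil => rfl
  | cons t ts ih =>
    rw [List.map_cons, List.foldl_cons, List.foldl_cons, h t (by simp)]
    have hstep : (match some (pvPairB t) with
      | none => e
      | some (major, minor) =>
        if e.contains major = false then e.insert major minor
        else e.insert major (max (e.getD major 0) minor)) = pvStep e (pvPairB t) := by
      unfold pvStep
      rcases pvPairB t with ⟨a, b⟩
      by_cases hc : e.contains a = false <;> simp [hc]
    rw [hstep]
    exact ih (fun t' ht' => h t' (by simp [ht'])) _

-- ===== VERDICT (by name: the statement is the Claim_ definition above) =====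
theorem get_next_unreleased_versions_spec : Claim_equal_get_next_unreleased_versions := by
  intro s _hdom hpre
  unfold Spec_get_next_unreleased_versions
  unfold get_next_unreleased_versions get_next_unreleased_versions_alt
  simp only []
  rw [Pre_get_next_unreleased_versions, List.all_eq_true] at hpre
  set toks := PySem.Str.split₀ s with htoks
  set L : List (Int × Int) := toks.map pvPairB with hL
  have htok : ∀ t ∈ toks, pvMajMinA t = some (pvPairB t) := by
    intro t ht
    exact pvTokOk_majmin t (hpre t ht)
  -- A's dict, as a fold of pvStep over the parsed pair list
  rw [pvFoldA toks htok]
  set d : PySem.Dict Int Int := L.foldl pvStep PySem.Dict.empty with hd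
  -- the per-major maximum both programs compute
  set g : Int → Int := fun m =>
    (PySem.List.max? ((L.filter (fun p => p.1 == m)).map Prod.snd) (fun x => x)).getD 0 with hg
  set M : List Int := PySem.List.sorted (PySem.Set.ofList (L.map Prod.fst)) (fun x => x) with hM
  have hdstep : d = L.foldl (fun d p =>
      d.insert p.1 (if d.contains p.1 = false then p.2 else max (d.getD p.1 0) p.2))
      PySem.Dict.empty := hd
  have hkeys : d.keys = PySem.Set.update (PySem.Dict.empty : PySem.Dict Int Int).keys (L.map Prod.fst) := by
    rw [hdstep]
    exact PySem.Dict.keys_foldl_insert_key L Prod.fst _ _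
  have hmem : ∀ m : Int, m ∈ d.keys ↔ m ∈ L.map Prod.fst := by
    intro m
    rw [hkeys, PySem.Set.mem_update, PySem.Dict.keys_empty]
    simp
  have hnd : d.keys.Nodup := by
    rw [hdstep]
    exact PySem.Dict.nodup_keys_foldl_insert_key L Prod.fst _ _ PySem.Dict.nodup_keys_empty
  have hval : ∀ m ∈ L.map Prod.fst, d.getD m 0 = g m := by
    intro m hm
    have hne : (L.filter (fun p => p.1 == m)).map Prod.snd ≠ [] := by
      simp only [ne_eq, List.map_eq_nil_iff, List.filter_eq_nil_iff, not_forall]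
      rcases List.mem_map.mp hm with ⟨p, hp, hpm⟩
      exact ⟨p, hp, by simp [hpm]⟩
    rcases List.exists_cons_of_ne_nil hne with ⟨x, r, hxr⟩
    have hget : d.get? m = pvMax0 none ((L.filter (fun p => p.1 == m)).map Prod.snd) := by
      rw [hd, pvFold_get? L PySem.Dict.empty m]
      rfl
    rw [PySem.Dict.getD, hget, hxr]
    have h1 : pvMax0 none (x :: r) = pvMax0 (some x) r := rfl
    rw [h1, pvMax0_some, hg]
    show _ = (PySem.List.max? ((L.filter (fun p => p.1 == m)).map Prod.snd) (fun x => x)).getD 0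
    rw [hxr, PySem.List.max?_id_cons]
  have hMpw : M.Pairwise (fun a b => a < b) :=
    PySem.List.sorted_ofList_pairwise_lt (L.map Prod.fst)
  have hMnd : M.Nodup := by
    rw [List.nodup_iff_pairwise_ne]
    exact hMpw.imp (fun h => ne_of_lt h)
  have hMmem : ∀ m : Int, m ∈ M ↔ m ∈ L.map Prod.fst := by
    intro m
    rw [hM, PySem.List.mem_sorted]
    exact PySem.Set.mem_ofList _ m
  have hkeysperm : M.Perm d.keys := by
    rw [List.perm_ext_iff_of_nodup hMnd hnd]
    intro m
    rw [hMmem, hmem]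
  set ys : List (Int × Int) := M.map (fun m => (m, g m)) with hys
  have hitems : d.items = d.keys.map (fun k => (k, d.getD k 0)) :=
    PySem.Dict.items_eq_map_keys d hnd 0
  have hysperm : ys.Perm d.items := by
    rw [hitems, hys]
    have h1 : M.map (fun m => (m, g m)) = M.map (fun k => (k, d.getD k 0)) := by
      apply List.map_congr_left
      intro m hm
      rw [hval m ((hMmem m).mp hm)]
    rw [h1]
    exact hkeysperm.map _
  have hyspw : ys.Pairwise (fun a b => a.1 < b.1) := by
    rw [hys, List.pairwise_map]
    exact hMpw
  rw [pvSorted2_eq d.items ys hysperm hyspw]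
  rw [PySem.List.foldl_append_singleton_eq_map
    (fun p : Int × Int =>
      if p.1 ≥ 1877 then PySem.Int.toStr p.1 ++ "." ++ PySem.Int.toStr (p.2 + 1) ++ ".0"
      else PySem.Int.toStr p.1 ++ "." ++ PySem.Int.toStr (p.2 + 1)) ys []]
  rw [List.nil_append, hys, List.map_map]
  congr 1
  apply List.map_congr_left
  intro m _
  simp only [Function.comp]
  by_cases hc : m ≥ 1877
  · simp [hc, hg]
  · simp [hc, hg, String.append_empty]
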